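-- pv_equiv track=rewrite | github.com/danielbkantor/AIWork | Homework 5/updatedhomework5 .py | getNumValuesRemaining
-- ===== SOURCE A (Python) =====
-- def getNumValuesRemaining(c_map, graph, node):
--     count = 3
--     oneFlag = False
--     twoFlag = False
--     threeFlag = False
--
--     for i in graph[node]:
--         if c_map[i] == 1 and oneFlag == False:
--             count -= 1
--             oneFlag = True
--         elif c_map[i] == 2 and twoFlag == False:
--             count -= 1
--             twoFlag = True
--         elif c_map[i] == 3 and threeFlag == False:
--             count -= 1
--             threeFlag = True
--     return count
-- ===== SOURCE B (Python) =====
-- def getNumValuesRemaining(c_map, graph, node):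
--     colors = [c_map[i] for i in graph[node]]
--     return sum(1 for c in (1, 2, 3) if c not in colors)
-- ===== Notes on version B (the rewrite author's own statement) =====
-- stated objective: alternative
-- what changed: Inverts the traversal: instead of one pass over the neighbors maintaining a counter and three boolean flags, B loops over the three candidate colors and counts, by a membership scan of the neighbor-color list per candidate, those that do not occur.
import Mathlib
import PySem

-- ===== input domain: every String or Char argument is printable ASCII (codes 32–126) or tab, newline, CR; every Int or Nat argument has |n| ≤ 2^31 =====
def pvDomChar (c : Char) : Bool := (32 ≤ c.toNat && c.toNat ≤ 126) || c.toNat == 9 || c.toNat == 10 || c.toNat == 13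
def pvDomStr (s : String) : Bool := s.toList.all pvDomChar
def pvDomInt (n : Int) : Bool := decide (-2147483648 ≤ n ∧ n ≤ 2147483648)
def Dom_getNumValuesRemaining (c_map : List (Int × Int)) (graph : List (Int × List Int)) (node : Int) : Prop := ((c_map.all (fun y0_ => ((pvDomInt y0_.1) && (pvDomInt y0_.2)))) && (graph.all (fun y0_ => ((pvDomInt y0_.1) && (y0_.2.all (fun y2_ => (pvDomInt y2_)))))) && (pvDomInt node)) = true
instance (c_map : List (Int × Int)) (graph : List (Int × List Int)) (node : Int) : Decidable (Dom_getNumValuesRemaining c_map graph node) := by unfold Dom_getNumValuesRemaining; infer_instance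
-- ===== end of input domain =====

-- B inverts A's traversal: it loops over the three candidate colors and counts those
-- absent from the list of neighbor colors; objective: alternative decomposition.

-- ===== PORT A =====
-- the for-loop over graph[node] with state (count, oneFlag, twoFlag, threeFlag);
-- c_map[i] / graph[node] are total via getD, exact under Pre_ (keys present)
def pvALoop (c_map : List (Int × Int)) : List Int → Int → Bool → Bool → Bool → Int
  | [], count, _, _, _ => count
  | i :: rest, count, oneFlag, twoFlag, threeFlag =>
    if PySem.Dict.getD (PySem.Dict.mk c_map) i (0 : Int) = 1 ∧ oneFlag = false then
      pvALoop c_map rest (count - 1) true twoFlag threeFlag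
    else if PySem.Dict.getD (PySem.Dict.mk c_map) i (0 : Int) = 2 ∧ twoFlag = false then
      pvALoop c_map rest (count - 1) oneFlag true threeFlag
    else if PySem.Dict.getD (PySem.Dict.mk c_map) i (0 : Int) = 3 ∧ threeFlag = false then
      pvALoop c_map rest (count - 1) oneFlag twoFlag true
    else
      pvALoop c_map rest count oneFlag twoFlag threeFlag

def getNumValuesRemaining (c_map : List (Int × Int)) (graph : List (Int × List Int)) (node : Int) : Int :=
  pvALoop c_map (PySem.Dict.getD (PySem.Dict.mk graph) node ([] : List Int)) 3 false false false

-- ===== PORT B =====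
-- colors = [c_map[i] for i in graph[node]]; then sum over the candidate colors (1,2,3)
-- of the indicator 'c not in colors'
def getNumValuesRemaining_alt (c_map : List (Int × Int)) (graph : List (Int × List Int)) (node : Int) : Int :=
  let colors := (PySem.Dict.getD (PySem.Dict.mk graph) node ([] : List Int)).map
    (fun i => PySem.Dict.getD (PySem.Dict.mk c_map) i (0 : Int))
  ([1, 2, 3] : List Int).foldl (fun acc c => if c ∈ colors then acc else acc + 1) 0

-- ===== PRECONDITION & SPEC =====
-- Pre_ excludes exactly the inputs where Python A raises KeyError: node absent from
-- graph, or a listed neighbor absent from c_map.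
def Pre_getNumValuesRemaining (c_map : List (Int × Int)) (graph : List (Int × List Int)) (node : Int) : Prop :=
  node ∈ (PySem.Dict.mk graph).keys ∧
    ∀ i ∈ PySem.Dict.getD (PySem.Dict.mk graph) node ([] : List Int), i ∈ (PySem.Dict.mk c_map).keys
instance (c_map : List (Int × Int)) (graph : List (Int × List Int)) (node : Int) : Decidable (Pre_getNumValuesRemaining c_map graph node) := by unfold Pre_getNumValuesRemaining; infer_instance

def pvWitness_getNumValuesRemaining : (List (Int × Int)) × (List (Int × List Int)) × Int :=
  ([(0, 1), (1, 2)], [(0, [1, 1]), (1, [0])], 0)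

def Spec_getNumValuesRemaining (c_map : List (Int × Int)) (graph : List (Int × List Int)) (node : Int) (out : Int) : Prop := out = getNumValuesRemaining_alt c_map graph node
instance (c_map : List (Int × Int)) (graph : List (Int × List Int)) (node : Int) (out : Int) : Decidable (Spec_getNumValuesRemaining c_map graph node out) := by unfold Spec_getNumValuesRemaining; infer_instance

-- ===== CLAIM (what is proved, stated in full; the proofs are below) =====
def Claim_equal_getNumValuesRemaining : Prop := ∀ (c_map : List (Int × Int)) (graph : List (Int × List Int)) (node : Int), Dom_getNumValuesRemaining c_map graph node → Pre_getNumValuesRemaining c_map graph node → Spec_getNumValuesRemaining c_map graph node (getNumValuesRemaining c_map graph node)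

-- ===== LEMMAS AND PROOFS =====

-- A's loop, characterised: it subtracts 1 for each color in {1,2,3} that occurs among
-- the looked-up neighbor colors and whose flag is not already set.
set_option maxHeartbeats 1000000 in
theorem pvALoop_eq (c_map : List (Int × Int)) (l : List Int)
    (c : Int) (f1 f2 f3 : Bool) :
    pvALoop c_map l c f1 f2 f3 =
      c - (if f1 = false ∧ (1 : Int) ∈ l.map (fun i => PySem.Dict.getD (PySem.Dict.mk c_map) i (0 : Int)) then 1 else 0)
        - (if f2 = false ∧ (2 : Int) ∈ l.map (fun i => PySem.Dict.getD (PySem.Dict.mk c_map) i (0 : Int)) then 1 else 0)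
        - (if f3 = false ∧ (3 : Int) ∈ l.map (fun i => PySem.Dict.getD (PySem.Dict.mk c_map) i (0 : Int)) then 1 else 0) := by
  induction l generalizing c f1 f2 f3 with
  | nil => simp [pvALoop]
  | cons i rest ih =>
    simp only [pvALoop, List.map_cons, List.mem_cons]
    generalize PySem.Dict.getD (PySem.Dict.mk c_map) i (0 : Int) = x
    simp only [ih]
    generalize List.map (fun i => PySem.Dict.getD (PySem.Dict.mk c_map) i (0 : Int)) rest = m
    by_cases h1 : x = 1
    · subst h1
      cases f1 <;> cases f2 <;> cases f3 <;>
        by_cases hm1 : (1 : Int) ∈ m <;> by_cases hm2 : (2 : Int) ∈ m <;>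
          by_cases hm3 : (3 : Int) ∈ m <;> simp [hm1, hm2, hm3]
    · by_cases h2 : x = 2
      · subst h2
        cases f1 <;> cases f2 <;> cases f3 <;>
          by_cases hm1 : (1 : Int) ∈ m <;> by_cases hm2 : (2 : Int) ∈ m <;>
            by_cases hm3 : (3 : Int) ∈ m <;> simp [hm1, hm2, hm3]
      · by_cases h3 : x = 3
        · subst h3
          cases f1 <;> cases f2 <;> cases f3 <;>
            by_cases hm1 : (1 : Int) ∈ m <;> by_cases hm2 : (2 : Int) ∈ m <;>
              by_cases hm3 : (3 : Int) ∈ m <;> simp [hm1, hm2, hm3]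
        · cases f1 <;> cases f2 <;> cases f3 <;>
            by_cases hm1 : (1 : Int) ∈ m <;> by_cases hm2 : (2 : Int) ∈ m <;>
              by_cases hm3 : (3 : Int) ∈ m <;>
                simp [eq_comm, h1, h2, h3, hm1, hm2, hm3]

-- ===== VERDICT (by name: the statement is the Claim_ definition above) =====
theorem getNumValuesRemaining_spec : Claim_equal_getNumValuesRemaining := by
  intro c_map graph node _ _
  unfold Spec_getNumValuesRemaining getNumValuesRemaining getNumValuesRemaining_alt
  rw [pvALoop_eq]
  simp only [true_and]
  by_cases h1 : (1 : Int) ∈ List.map (fun i => PySem.Dict.getD (PySem.Dict.mk c_map) i (0 : Int)) (PySem.Dict.getD (PySem.Dict.mk graph) node ([] : List Int)) <;>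
    by_cases h2 : (2 : Int) ∈ List.map (fun i => PySem.Dict.getD (PySem.Dict.mk c_map) i (0 : Int)) (PySem.Dict.getD (PySem.Dict.mk graph) node ([] : List Int)) <;>
      by_cases h3 : (3 : Int) ∈ List.map (fun i => PySem.Dict.getD (PySem.Dict.mk c_map) i (0 : Int)) (PySem.Dict.getD (PySem.Dict.mk graph) node ([] : List Int)) <;>
        simp [List.foldl, h1, h2, h3]
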